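-- pv_equiv track=rewrite | github.com/cernutog/oas-generation-tool | tests/utils/deep_diff.py | format_diff_report
-- ===== SOURCE A (Python) =====
-- def format_diff_report(differences: list[str], max_items: int = 50) -> str:
--     """
--     Format a list of differences into a human-readable report.
--
--     Args:
--         differences: List of difference strings
--         max_items: Maximum number of items to show
--
--     Returns:
--         Formatted report string
--     """
--     if not differences:
--         return "[OK] No differences found."
--
--     lines = [f"[FAIL] Found {len(differences)} difference(s):\n"]
--
--     # Group by type
--     missing = [d for d in differences if d.startswith("MISSING:")]
--     extra = [d for d in differences if d.startswith("EXTRA:")]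
--     changed = [d for d in differences if d.startswith("CHANGED:")]
--     type_mismatch = [d for d in differences if d.startswith("TYPE_MISMATCH:")]
--     length_mismatch = [d for d in differences if d.startswith("LENGTH_MISMATCH:")]
--
--     if missing:
--         lines.append(f"\n--- MISSING ({len(missing)}) ---")
--         for item in missing[:max_items]:
--             lines.append(f"  {item}")
--         if len(missing) > max_items:
--             lines.append(f"  ... and {len(missing) - max_items} more")
--
--     if extra:
--         lines.append(f"\n--- EXTRA ({len(extra)}) ---")
--         for item in extra[:max_items]:
--             lines.append(f"  {item}")
--         if len(extra) > max_items:
--             lines.append(f"  ... and {len(extra) - max_items} more")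
--
--     if changed:
--         lines.append(f"\n--- CHANGED ({len(changed)}) ---")
--         for item in changed[:max_items]:
--             lines.append(f"  {item}")
--         if len(changed) > max_items:
--             lines.append(f"  ... and {len(changed) - max_items} more")
--
--     if type_mismatch:
--         lines.append(f"\n--- TYPE MISMATCH ({len(type_mismatch)}) ---")
--         for item in type_mismatch[:max_items]:
--             lines.append(f"  {item}")
--
--     if length_mismatch:
--         lines.append(f"\n--- LENGTH MISMATCH ({len(length_mismatch)}) ---")
--         for item in length_mismatch[:max_items]:
--             lines.append(f"  {item}")
--
--     return "\n".join(lines)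
-- ===== SOURCE B (Python) =====
-- _SPEC = [
--     ("MISSING:", "MISSING", True),
--     ("EXTRA:", "EXTRA", True),
--     ("CHANGED:", "CHANGED", True),
--     ("TYPE_MISMATCH:", "TYPE MISMATCH", False),
--     ("LENGTH_MISMATCH:", "LENGTH MISMATCH", False),
-- ]
--
--
-- def format_diff_report(differences: list[str], max_items: int = 50) -> str:
--     """One classification pass into prefix-keyed buckets, then data-driven emission."""
--     if not differences:
--         return "[OK] No differences found."
--     buckets = {}
--     for d in differences:
--         for prefix, _label, _more in _SPEC:
--             if d.startswith(prefix):
--                 buckets.setdefault(prefix, []).append(d)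
--                 break
--     lines = [f"[FAIL] Found {len(differences)} difference(s):\n"]
--     for prefix, label, show_more in _SPEC:
--         group = buckets.get(prefix, [])
--         if group:
--             lines.append(f"\n--- {label} ({len(group)}) ---")
--             lines.extend(f"  {item}" for item in group[:max_items])
--             if show_more and len(group) > max_items:
--                 lines.append(f"  ... and {len(group) - max_items} more")
--     return "\n".join(lines)
-- ===== Notes on version B (the rewrite author's own statement) =====
-- stated objective: simpler
-- what changed: Replaces the five separate filter passes and five copy-pasted report blocks with one classification pass appending each string into a dict of buckets keyed by its matching prefix, followed by a single data-driven emission loop over an ordered (prefix, label, show_more) spec table.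
import Mathlib
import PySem

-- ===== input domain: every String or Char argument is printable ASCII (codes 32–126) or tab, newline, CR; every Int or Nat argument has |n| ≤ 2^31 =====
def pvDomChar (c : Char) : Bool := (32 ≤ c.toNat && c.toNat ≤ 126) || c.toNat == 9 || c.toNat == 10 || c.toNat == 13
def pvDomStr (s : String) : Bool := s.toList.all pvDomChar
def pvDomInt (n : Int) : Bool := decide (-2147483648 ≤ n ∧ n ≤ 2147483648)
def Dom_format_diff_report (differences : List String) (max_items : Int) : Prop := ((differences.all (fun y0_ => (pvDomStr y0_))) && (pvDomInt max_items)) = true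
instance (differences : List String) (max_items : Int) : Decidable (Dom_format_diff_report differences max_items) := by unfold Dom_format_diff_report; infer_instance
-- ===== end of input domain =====

-- B replaces A's five filter passes and five copy-pasted blocks by one classification
-- pass into prefix-keyed buckets plus a data-driven emission loop (same return value).

-- ===== PORT A =====
def format_diff_report (differences : List String) (max_items : Int) : String :=
  if differences = [] then "[OK] No differences found."
  else
    let lines0 : List String := ["[FAIL] Found " ++ PySem.Int.toStr (PySem.List.len differences) ++ " difference(s):\n"]
    let missing := differences.filter (fun d => PySem.Str.startswith d "MISSING:")
    let extra := differences.filter (fun d => PySem.Str.startswith d "EXTRA:")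
    let changed := differences.filter (fun d => PySem.Str.startswith d "CHANGED:")
    let type_mismatch := differences.filter (fun d => PySem.Str.startswith d "TYPE_MISMATCH:")
    let length_mismatch := differences.filter (fun d => PySem.Str.startswith d "LENGTH_MISMATCH:")
    let lines1 := if missing = [] then lines0 else
      (lines0 ++ ["\n--- MISSING (" ++ PySem.Int.toStr (PySem.List.len missing) ++ ") ---"]
        ++ (PySem.List.slice missing none (some max_items)).map (fun item => "  " ++ item))
      ++ (if PySem.List.len missing > max_items then ["  ... and " ++ PySem.Int.toStr (PySem.List.len missing - max_items) ++ " more"] else [])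
    let lines2 := if extra = [] then lines1 else
      (lines1 ++ ["\n--- EXTRA (" ++ PySem.Int.toStr (PySem.List.len extra) ++ ") ---"]
        ++ (PySem.List.slice extra none (some max_items)).map (fun item => "  " ++ item))
      ++ (if PySem.List.len extra > max_items then ["  ... and " ++ PySem.Int.toStr (PySem.List.len extra - max_items) ++ " more"] else [])
    let lines3 := if changed = [] then lines2 else
      (lines2 ++ ["\n--- CHANGED (" ++ PySem.Int.toStr (PySem.List.len changed) ++ ") ---"]
        ++ (PySem.List.slice changed none (some max_items)).map (fun item => "  " ++ item))
      ++ (if PySem.List.len changed > max_items then ["  ... and " ++ PySem.Int.toStr (PySem.List.len changed - max_items) ++ " more"] else [])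
    let lines4 := if type_mismatch = [] then lines3 else
      lines3 ++ ["\n--- TYPE MISMATCH (" ++ PySem.Int.toStr (PySem.List.len type_mismatch) ++ ") ---"]
        ++ (PySem.List.slice type_mismatch none (some max_items)).map (fun item => "  " ++ item)
    let lines5 := if length_mismatch = [] then lines4 else
      lines4 ++ ["\n--- LENGTH MISMATCH (" ++ PySem.Int.toStr (PySem.List.len length_mismatch) ++ ") ---"]
        ++ (PySem.List.slice length_mismatch none (some max_items)).map (fun item => "  " ++ item)
    PySem.Str.join "\n" lines5

-- ===== PORT B =====
-- the ordered spec table _SPEC of Source B: (prefix, display label, show the "... and N more" line)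
def fdrSpec : List (String × String × Bool) :=
  [("MISSING:", "MISSING", true),
   ("EXTRA:", "EXTRA", true),
   ("CHANGED:", "CHANGED", true),
   ("TYPE_MISMATCH:", "TYPE MISMATCH", false),
   ("LENGTH_MISMATCH:", "LENGTH MISMATCH", false)]

-- one step of Source B's classification loop: first matching prefix gets d appended to its bucket
def fdrClassify (buckets : PySem.Dict String (List String)) (d : String) : PySem.Dict String (List String) :=
  match fdrSpec.find? (fun e => PySem.Str.startswith d e.1) with
  | some e => buckets.modify e.1 [] (fun g => g ++ [d])
  | none => buckets

def format_diff_report_alt (differences : List String) (max_items : Int) : String :=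
  if differences = [] then "[OK] No differences found."
  else
    let buckets := differences.foldl fdrClassify PySem.Dict.empty
    let lines := fdrSpec.foldl (fun lines e =>
      let group := buckets.getD e.1 []
      if group = [] then lines
      else
        (lines ++ ["\n--- " ++ e.2.1 ++ " (" ++ PySem.Int.toStr (PySem.List.len group) ++ ") ---"]
          ++ (PySem.List.slice group none (some max_items)).map (fun item => "  " ++ item))
        ++ (if e.2.2 && decide (PySem.List.len group > max_items) then
              ["  ... and " ++ PySem.Int.toStr (PySem.List.len group - max_items) ++ " more"] else []))
      ["[FAIL] Found " ++ PySem.Int.toStr (PySem.List.len differences) ++ " difference(s):\n"]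
    PySem.Str.join "\n" lines

-- ===== PRECONDITION & SPEC =====
def Spec_format_diff_report (differences : List String) (max_items : Int) (out : String) : Prop := out = format_diff_report_alt differences max_items
instance (differences : List String) (max_items : Int) (out : String) : Decidable (Spec_format_diff_report differences max_items out) := by unfold Spec_format_diff_report; infer_instance

-- ===== CLAIM (what is proved, stated in full; the proofs are below) =====
def Claim_equal_format_diff_report : Prop := ∀ (differences : List String) (max_items : Int), Dom_format_diff_report differences max_items → Spec_format_diff_report differences max_items (format_diff_report differences max_items)

-- ===== LEMMAS AND PROOFS =====
-- a nonempty prefix of d pins down d's first character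
lemma fdr_startswith_head (d p : String) (c : Char)
    (hp : PySem.Str.startswith d p = true) (hc : p.toList.head? = some c) :
    d.toList.head? = some c := by
  rw [PySem.Str.startswith_eq] at hp
  rw [PySem.Chars.startswith_iff] at hp
  obtain ⟨t, ht⟩ := hp
  cases h : p.toList <;> simp_all [← ht]

-- two prefixes with different first characters cannot both match d
lemma fdr_ne_of_head (d p q : String) (cp cq : Char)
    (hq : PySem.Str.startswith d q = true)
    (h1 : p.toList.head? = some cp) (h2 : q.toList.head? = some cq) (hne : cp ≠ cq) :
    PySem.Str.startswith d p = false := by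
  by_contra h
  have hp' : PySem.Str.startswith d p = true := by
    cases hb : PySem.Str.startswith d p <;> simp_all
  have a := fdr_startswith_head d p cp hp' h1
  have b := fdr_startswith_head d q cq hq h2
  rw [a] at b
  exact hne (by simpa using b)

-- at most one of the five spec prefixes matches, so the step appends d to exactly its bucket
lemma fdr_classify_getD (b : PySem.Dict String (List String)) (d p : String)
    (hp : p ∈ fdrSpec.map (·.1)) :
    (fdrClassify b d).getD p [] =
      b.getD p [] ++ (if PySem.Str.startswith d p then [d] else []) := by
  simp only [fdrSpec, List.map_cons, List.map_nil, List.mem_cons, List.not_mem_nil, or_false] at hp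
  unfold fdrClassify
  simp only [fdrSpec, List.find?]
  by_cases h1 : PySem.Str.startswith d "MISSING:" = true
  · simp only [h1]
    rcases hp with rfl | rfl | rfl | rfl | rfl
    · rw [PySem.Dict.getD_modify, if_pos rfl, if_pos h1]
    · have hx := fdr_ne_of_head d "EXTRA:" "MISSING:" 'E' 'M' h1 (by decide) (by decide) (by decide)
      rw [PySem.Dict.getD_modify, if_neg (show ¬("EXTRA:" : String) = "MISSING:" by decide),
          if_neg (by rw [hx]; simp), List.append_nil]
    · have hx := fdr_ne_of_head d "CHANGED:" "MISSING:" 'C' 'M' h1 (by decide) (by decide) (by decide)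
      rw [PySem.Dict.getD_modify, if_neg (show ¬("CHANGED:" : String) = "MISSING:" by decide),
          if_neg (by rw [hx]; simp), List.append_nil]
    · have hx := fdr_ne_of_head d "TYPE_MISMATCH:" "MISSING:" 'T' 'M' h1 (by decide) (by decide) (by decide)
      rw [PySem.Dict.getD_modify, if_neg (show ¬("TYPE_MISMATCH:" : String) = "MISSING:" by decide),
          if_neg (by rw [hx]; simp), List.append_nil]
    · have hx := fdr_ne_of_head d "LENGTH_MISMATCH:" "MISSING:" 'L' 'M' h1 (by decide) (by decide) (by decide)
      rw [PySem.Dict.getD_modify, if_neg (show ¬("LENGTH_MISMATCH:" : String) = "MISSING:" by decide),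
          if_neg (by rw [hx]; simp), List.append_nil]
  · simp only [eq_false_of_ne_true h1]
    by_cases h2 : PySem.Str.startswith d "EXTRA:" = true
    · simp only [h2]
      rcases hp with rfl | rfl | rfl | rfl | rfl
      · rw [PySem.Dict.getD_modify, if_neg (show ¬("MISSING:" : String) = "EXTRA:" by decide),
            if_neg (by rw [eq_false_of_ne_true h1]; simp), List.append_nil]
      · rw [PySem.Dict.getD_modify, if_pos rfl, if_pos h2]
      · have hx := fdr_ne_of_head d "CHANGED:" "EXTRA:" 'C' 'E' h2 (by decide) (by decide) (by decide)
        rw [PySem.Dict.getD_modify, if_neg (show ¬("CHANGED:" : String) = "EXTRA:" by decide),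
            if_neg (by rw [hx]; simp), List.append_nil]
      · have hx := fdr_ne_of_head d "TYPE_MISMATCH:" "EXTRA:" 'T' 'E' h2 (by decide) (by decide) (by decide)
        rw [PySem.Dict.getD_modify, if_neg (show ¬("TYPE_MISMATCH:" : String) = "EXTRA:" by decide),
            if_neg (by rw [hx]; simp), List.append_nil]
      · have hx := fdr_ne_of_head d "LENGTH_MISMATCH:" "EXTRA:" 'L' 'E' h2 (by decide) (by decide) (by decide)
        rw [PySem.Dict.getD_modify, if_neg (show ¬("LENGTH_MISMATCH:" : String) = "EXTRA:" by decide),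
            if_neg (by rw [hx]; simp), List.append_nil]
    · simp only [eq_false_of_ne_true h2]
      by_cases h3 : PySem.Str.startswith d "CHANGED:" = true
      · simp only [h3]
        rcases hp with rfl | rfl | rfl | rfl | rfl
        · rw [PySem.Dict.getD_modify, if_neg (show ¬("MISSING:" : String) = "CHANGED:" by decide),
              if_neg (by rw [eq_false_of_ne_true h1]; simp), List.append_nil]
        · rw [PySem.Dict.getD_modify, if_neg (show ¬("EXTRA:" : String) = "CHANGED:" by decide),
              if_neg (by rw [eq_false_of_ne_true h2]; simp), List.append_nil]
        · rw [PySem.Dict.getD_modify, if_pos rfl, if_pos h3]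
        · have hx := fdr_ne_of_head d "TYPE_MISMATCH:" "CHANGED:" 'T' 'C' h3 (by decide) (by decide) (by decide)
          rw [PySem.Dict.getD_modify, if_neg (show ¬("TYPE_MISMATCH:" : String) = "CHANGED:" by decide),
              if_neg (by rw [hx]; simp), List.append_nil]
        · have hx := fdr_ne_of_head d "LENGTH_MISMATCH:" "CHANGED:" 'L' 'C' h3 (by decide) (by decide) (by decide)
          rw [PySem.Dict.getD_modify, if_neg (show ¬("LENGTH_MISMATCH:" : String) = "CHANGED:" by decide),
              if_neg (by rw [hx]; simp), List.append_nil]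
      · simp only [eq_false_of_ne_true h3]
        by_cases h4 : PySem.Str.startswith d "TYPE_MISMATCH:" = true
        · simp only [h4]
          rcases hp with rfl | rfl | rfl | rfl | rfl
          · rw [PySem.Dict.getD_modify, if_neg (show ¬("MISSING:" : String) = "TYPE_MISMATCH:" by decide),
                if_neg (by rw [eq_false_of_ne_true h1]; simp), List.append_nil]
          · rw [PySem.Dict.getD_modify, if_neg (show ¬("EXTRA:" : String) = "TYPE_MISMATCH:" by decide),
                if_neg (by rw [eq_false_of_ne_true h2]; simp), List.append_nil]
          · rw [PySem.Dict.getD_modify, if_neg (show ¬("CHANGED:" : String) = "TYPE_MISMATCH:" by decide),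
                if_neg (by rw [eq_false_of_ne_true h3]; simp), List.append_nil]
          · rw [PySem.Dict.getD_modify, if_pos rfl, if_pos h4]
          · have hx := fdr_ne_of_head d "LENGTH_MISMATCH:" "TYPE_MISMATCH:" 'L' 'T' h4 (by decide) (by decide) (by decide)
            rw [PySem.Dict.getD_modify, if_neg (show ¬("LENGTH_MISMATCH:" : String) = "TYPE_MISMATCH:" by decide),
                if_neg (by rw [hx]; simp), List.append_nil]
        · simp only [eq_false_of_ne_true h4]
          by_cases h5 : PySem.Str.startswith d "LENGTH_MISMATCH:" = true
          · simp only [h5]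
            rcases hp with rfl | rfl | rfl | rfl | rfl
            · rw [PySem.Dict.getD_modify, if_neg (show ¬("MISSING:" : String) = "LENGTH_MISMATCH:" by decide),
                  if_neg (by rw [eq_false_of_ne_true h1]; simp), List.append_nil]
            · rw [PySem.Dict.getD_modify, if_neg (show ¬("EXTRA:" : String) = "LENGTH_MISMATCH:" by decide),
                  if_neg (by rw [eq_false_of_ne_true h2]; simp), List.append_nil]
            · rw [PySem.Dict.getD_modify, if_neg (show ¬("CHANGED:" : String) = "LENGTH_MISMATCH:" by decide),
                  if_neg (by rw [eq_false_of_ne_true h3]; simp), List.append_nil]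
            · rw [PySem.Dict.getD_modify, if_neg (show ¬("TYPE_MISMATCH:" : String) = "LENGTH_MISMATCH:" by decide),
                  if_neg (by rw [eq_false_of_ne_true h4]; simp), List.append_nil]
            · rw [PySem.Dict.getD_modify, if_pos rfl, if_pos h5]
          · simp only [eq_false_of_ne_true h5]
            rcases hp with rfl | rfl | rfl | rfl | rfl
            · rw [if_neg (by rw [eq_false_of_ne_true h1]; simp), List.append_nil]
            · rw [if_neg (by rw [eq_false_of_ne_true h2]; simp), List.append_nil]
            · rw [if_neg (by rw [eq_false_of_ne_true h3]; simp), List.append_nil]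
            · rw [if_neg (by rw [eq_false_of_ne_true h4]; simp), List.append_nil]
            · rw [if_neg (by rw [eq_false_of_ne_true h5]; simp), List.append_nil]

lemma fdr_buckets_getD_gen (ds : List String) (p : String) (hp : p ∈ fdrSpec.map (·.1)) :
    ∀ b : PySem.Dict String (List String),
      (ds.foldl fdrClassify b).getD p [] =
        b.getD p [] ++ ds.filter (fun d => PySem.Str.startswith d p) := by
  induction ds with
  | nil => intro b; simp
  | cons d ds ih =>
    intro b
    simp only [List.foldl_cons, List.filter_cons]
    rw [ih (fdrClassify b d), fdr_classify_getD b d p hp]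
    by_cases h : PySem.Str.startswith d p = true
    · rw [if_pos h, if_pos h]
      simp [List.append_assoc]
    · rw [if_neg h, if_neg h]
      simp

lemma fdr_buckets_getD (ds : List String) (p : String) (hp : p ∈ fdrSpec.map (·.1)) :
    (ds.foldl fdrClassify PySem.Dict.empty).getD p [] =
      ds.filter (fun d => PySem.Str.startswith d p) := by
  rw [fdr_buckets_getD_gen ds p hp PySem.Dict.empty]
  simp [PySem.Dict.getD_empty]

-- ===== VERDICT (by name: the statement is the Claim_ definition above) =====
theorem format_diff_report_spec : Claim_equal_format_diff_report := by
  intro differences max_items _dom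
  unfold Spec_format_diff_report
  by_cases hd : differences = []
  · simp [format_diff_report, format_diff_report_alt, hd]
  · unfold format_diff_report format_diff_report_alt
    simp only [if_neg hd]
    simp only [fdrSpec, List.foldl]
    rw [fdr_buckets_getD differences "MISSING:" (by decide),
        fdr_buckets_getD differences "EXTRA:" (by decide),
        fdr_buckets_getD differences "CHANGED:" (by decide),
        fdr_buckets_getD differences "TYPE_MISMATCH:" (by decide),
        fdr_buckets_getD differences "LENGTH_MISMATCH:" (by decide)]
    simp only [Bool.true_and, Bool.false_and, decide_eq_true_eq, Bool.false_eq_true,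
      if_false, List.append_nil]
    rfl
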